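-- pv_equiv track=rewrite | github.com/open-cu/code-cheating | course/1/subject_python/M/40501-39183.py | calc
-- ===== SOURCE A (Python) =====
-- def calc(n: int, x: list) -> list:
--     strike = []
--     count = 1
--     for c in range(n - 1):
--         if x[c + 1] > x[c]:
--             count += 1
--         else:
--             strike.append(count)
--             count = 1
--         if c == n - 2:
--             strike.append(count)
--     return strike
-- ===== SOURCE B (Python) =====
-- def calc(n: int, x: list) -> list:
--     if n < 2:
--         return []
--     bounds = [0] + [c + 1 for c in range(n - 1) if not x[c + 1] > x[c]] + [n]
--     return [bounds[i + 1] - bounds[i] for i in range(len(bounds) - 1)]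
-- ===== Notes on version B (the rewrite author's own statement) =====
-- stated objective: alternative
-- what changed: B collects the run-boundary indices in one comprehension and derives the run lengths by differencing consecutive boundaries, instead of threading a mutable counter with an in-loop last-iteration flush.
import Mathlib
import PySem

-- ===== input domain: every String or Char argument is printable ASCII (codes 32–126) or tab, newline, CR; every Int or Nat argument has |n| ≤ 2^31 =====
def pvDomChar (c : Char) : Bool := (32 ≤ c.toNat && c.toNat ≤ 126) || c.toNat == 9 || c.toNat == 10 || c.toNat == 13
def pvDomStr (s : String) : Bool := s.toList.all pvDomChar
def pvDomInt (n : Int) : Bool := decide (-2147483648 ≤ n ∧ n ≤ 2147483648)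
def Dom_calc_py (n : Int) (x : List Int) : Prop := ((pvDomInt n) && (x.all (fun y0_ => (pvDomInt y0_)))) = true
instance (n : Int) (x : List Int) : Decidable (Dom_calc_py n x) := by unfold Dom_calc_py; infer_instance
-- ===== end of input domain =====

-- B computes run lengths by collecting boundary indices and differencing them, instead of A's
-- in-loop counter with a last-iteration flush; equivalence is exact on all inputs where A returns.

-- ===== PORT A =====
-- one loop step of A's for-loop (both branches, then the c == n-2 flush), state = (strike, count)
def calcAStep (x : List Int) (n : Int) (s : List Int × Int) (c : Int) : List Int × Int :=
  let s' := if PySem.List.pyGetD x (c + 1) 0 > PySem.List.pyGetD x c 0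
            then (s.1, s.2 + 1)
            else (s.1 ++ [s.2], (1 : Int))
  if c = n - 2 then (s'.1 ++ [s'.2], s'.2) else s'

def calc_py (n : Int) (x : List Int) : List Int :=
  ((PySem.List.pyRange 0 (n - 1) 1).foldl (calcAStep x n) ([], 1)).1

-- ===== PORT B =====
def calc_py_alt (n : Int) (x : List Int) : List Int :=
  if n < 2 then []
  else
    let bounds : List Int :=
      [0] ++ ((PySem.List.pyRange 0 (n - 1) 1).filter
                (fun c => !(PySem.List.pyGetD x (c + 1) 0 > PySem.List.pyGetD x c 0))).map
              (fun c => c + 1) ++ [n]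
    (PySem.List.pyRange 0 ((bounds.length : Int) - 1) 1).map
      (fun i => PySem.List.pyGetD bounds (i + 1) 0 - PySem.List.pyGetD bounds i 0)

-- ===== PRECONDITION & SPEC =====
-- A raises IndexError when n ≥ 2 and x has fewer than n elements; those inputs are excluded.
def Pre_calc_py (n : Int) (x : List Int) : Prop := n < 2 ∨ n ≤ (x.length : Int)
instance (n : Int) (x : List Int) : Decidable (Pre_calc_py n x) := by unfold Pre_calc_py; infer_instance
def pvWitness_calc_py : Int × List Int := (3, [1, 2, 1])

def Spec_calc_py (n : Int) (x : List Int) (out : List Int) : Prop := out = calc_py_alt n x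
instance (n : Int) (x : List Int) (out : List Int) : Decidable (Spec_calc_py n x out) := by unfold Spec_calc_py; infer_instance

-- ===== CLAIM (what is proved, stated in full; the proofs are below) =====
def Claim_equal_calc_py : Prop := ∀ (n : Int) (x : List Int), Dom_calc_py n x → Pre_calc_py n x → Spec_calc_py n x (calc_py n x)

-- ===== LEMMAS AND PROOFS =====

-- consecutive differences of a list (the value B computes from its bounds list)
def diffs : List Int → List Int
  | a :: b :: t => (b - a) :: diffs (b :: t)
  | _ => []

theorem diffs_snoc (a : Int) (l : List Int) (v : Int) :
    diffs (a :: (l ++ [v])) = diffs (a :: l) ++ [v - l.getLastD a] := by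
  induction l generalizing a with
  | nil => simp [diffs]
  | cons b t ih =>
    simp only [List.cons_append, diffs] at ih ⊢
    rw [ih b, List.getLastD_cons]

-- B's index-differencing map is diffs
theorem map_getD_diff_eq_diffs (bs : List Int) :
    (List.range (bs.length - 1)).map (fun k => bs.getD (k + 1) 0 - bs.getD k 0) = diffs bs := by
  induction bs with
  | nil => simp [diffs]
  | cons a t ih =>
    cases t with
    | nil => simp [diffs]
    | cons b u =>
      simp only [List.length_cons, Nat.add_sub_cancel, List.range_succ_eq_map,
        List.map_cons, List.map_map]
      simp only [List.length_cons, Nat.add_sub_cancel] at ih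
      simp [diffs, Function.comp, ← ih]

theorem calc_alt_map_eq_diffs (bs : List Int) :
    (PySem.List.pyRange 0 ((bs.length : Int) - 1) 1).map
      (fun i => PySem.List.pyGetD bs (i + 1) 0 - PySem.List.pyGetD bs i 0) = diffs bs := by
  rw [PySem.List.pyRange_one, ← map_getD_diff_eq_diffs bs]
  have hlen : ((bs.length : Int) - 1 - 0).toNat = bs.length - 1 := by omega
  rw [hlen, List.map_map]
  refine List.map_congr_left (fun k hk => ?_)
  have h0 : ((0 : Int) + (k : Int)) = ((k : Nat) : Int) := by ring
  simp only [Function.comp, h0, PySem.List.pyGetD_natCast]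
  rw [show ((k : Int) + 1) = (((k + 1 : Nat)) : Int) from by push_cast; ring,
    PySem.List.pyGetD_natCast]

-- the breakpoints among c = 0 .. j-1, shifted by one
def brk (x : List Int) (j : Int) : List Int :=
  ((PySem.List.pyRange 0 j 1).filter
      (fun c => !(PySem.List.pyGetD x (c + 1) 0 > PySem.List.pyGetD x c 0))).map (fun c => c + 1)

theorem brk_succ (x : List Int) (j : Int) (hj : 0 ≤ j) :
    brk x (j + 1) = brk x j ++
      (if PySem.List.pyGetD x (j + 1) 0 > PySem.List.pyGetD x j 0 then [] else [j + 1]) := by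
  unfold brk
  rw [PySem.List.pyRange_one_succ_right hj, List.filter_append, List.map_append]
  by_cases h : PySem.List.pyGetD x (j + 1) 0 > PySem.List.pyGetD x j 0 <;> simp [h]

-- invariant of A's loop while c < n - 2 (the flush never fires)
theorem loop_inv (x : List Int) (n : Int) (j : Nat) (hj : (j : Int) ≤ n - 2) :
    (PySem.List.pyRange 0 (j : Int) 1).foldl (calcAStep x n) ([], 1) =
      (diffs (0 :: brk x j), (j : Int) + 1 - (brk x j).getLastD 0) := by
  induction j with
  | zero => simp [brk, diffs]
  | succ m ih =>
    have hm : (m : Int) ≤ n - 2 := by push_cast at hj ⊢; omega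
    have hb : brk x ((m : Int) + 1) = brk x (m : Int) ++
        (if PySem.List.pyGetD x ((m : Int) + 1) 0 > PySem.List.pyGetD x (m : Int) 0
         then [] else [(m : Int) + 1]) := brk_succ x m (by positivity)
    have hrange : PySem.List.pyRange 0 ((m : Int) + 1) 1 =
        PySem.List.pyRange 0 (m : Int) 1 ++ [(m : Int)] :=
      PySem.List.pyRange_one_succ_right (by positivity)
    have hne : (m : Int) ≠ n - 2 := by push_cast at hj; omega
    push_cast
    rw [hrange, List.foldl_append, ih hm, hb]
    by_cases h : PySem.List.pyGetD x ((m : Int) + 1) 0 > PySem.List.pyGetD x (m : Int) 0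
    · simp only [List.foldl_cons, List.foldl_nil, calcAStep, if_pos h, if_neg hne]
      simp only [List.append_nil, Prod.mk.injEq, true_and]
      ring
    · simp only [List.foldl_cons, List.foldl_nil, calcAStep, if_neg h, if_neg hne]
      refine Prod.ext ?_ ?_
      · show diffs (0 :: brk x (m : Int)) ++ [(m : Int) + 1 - (brk x (m : Int)).getLastD 0] =
          diffs (0 :: (brk x (m : Int) ++ [(m : Int) + 1]))
        rw [diffs_snoc]
      · show ((1 : Int)) = (m : Int) + 1 + 1 - (brk x (m : Int) ++ [(m : Int) + 1]).getLastD 0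
        simp

-- final step: at c = n - 2 the flush fires and A's strike equals diffs (0 :: (brk ++ [n]))
theorem calc_eq_diffs (x : List Int) (n : Int) (hn : 2 ≤ n) :
    calc_py n x = diffs (0 :: (brk x (n - 1) ++ [n])) := by
  unfold calc_py
  obtain ⟨j, hj⟩ : ∃ j : Nat, (j : Int) = n - 2 := ⟨(n - 2).toNat, by omega⟩
  have hsplit : PySem.List.pyRange 0 (n - 1) 1 =
      PySem.List.pyRange 0 (j : Int) 1 ++ [(j : Int)] := by
    have : n - 1 = (j : Int) + 1 := by omega
    rw [this]; exact PySem.List.pyRange_one_succ_right (by positivity)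
  have hb : brk x (n - 1) = brk x (j : Int) ++
      (if PySem.List.pyGetD x ((j : Int) + 1) 0 > PySem.List.pyGetD x (j : Int) 0
       then [] else [(j : Int) + 1]) := by
    have : n - 1 = (j : Int) + 1 := by omega
    rw [this]; exact brk_succ x j (by positivity)
  rw [hsplit, List.foldl_append, loop_inv x n j (by omega), hb]
  simp only [List.foldl_cons, List.foldl_nil]
  by_cases h : PySem.List.pyGetD x ((j : Int) + 1) 0 > PySem.List.pyGetD x (j : Int) 0
  · simp only [calcAStep, if_pos h, if_pos hj, List.append_nil]
    rw [diffs_snoc]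
    simp only [List.append_cancel_left_eq, List.cons.injEq, and_true]
    simp
    omega
  · simp only [calcAStep, if_neg h, if_pos hj]
    rw [show brk x (j : Int) ++ [(j : Int) + 1] ++ [n] =
          (brk x (j : Int) ++ [(j : Int) + 1]) ++ [n] from by simp,
      diffs_snoc, diffs_snoc]
    simp
    omega

-- ===== VERDICT (by name: the statement is the Claim_ definition above) =====
theorem calc_py_spec : Claim_equal_calc_py := by
  intro n x _ _
  unfold Spec_calc_py calc_py_alt
  by_cases hn : n < 2
  · simp only [if_pos hn]
    unfold calc_py
    have : PySem.List.pyRange 0 (n - 1) 1 = [] := PySem.List.pyRange_one_eq_nil (by omega)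
    simp [this]
  · simp only [if_neg hn]
    rw [calc_alt_map_eq_diffs, calc_eq_diffs x n (by omega)]
    congr 1
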